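-- pv_equiv track=rewrite | github.com/Yekyaa-/python3storage | RandomJunk/firstprog.py | createPegArray
-- ===== SOURCE A (Python) =====
-- def createPegArray(disks,m):
--     x = f'{m:b}'.zfill(disks)
--     thisList=[list(),list(),list()]
--     thisList[0].clear()
--     thisList[1].clear()
--     thisList[2].clear()
--
--     stackCounter = 0
--     bit0 = 0
--     currBit = 0
--     previousBit = 0
--     prevPost = 0
--     for i,c in enumerate(x):
--         # Convert character to 1 or 0
--         currBit = 1 if c == '1' else 0
--         # Handle largest disk first
--         if (i == 0):
--             stackCounter = 0
--             bit0 = currBit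
--             previousBit = currBit
--             # Largest Disk is either Initial position or Final Position
--             prevPost = bit0 * 2
--             thisList[prevPost].append(disks-i)
--         elif (previousBit == currBit):
--             thisList[prevPost].append(disks - i)
--             stackCounter = stackCounter + 1
--             # prevPost stays the same here
--         else:
--             calcMax = stackCounter + bit0
--             prevPost = (prevPost + (-1 if (calcMax % 2 == 1) else 1)) % 3
--             thisList[prevPost].append(disks-i)
--             previousBit = currBit
--     thisList[0].sort()
--     thisList[1].sort()
--     thisList[2].sort()
--     return thisList
-- ===== SOURCE B (Python) =====
-- def createPegArray(disks, m):
--     # Run-based pass: group the padded binary string into maximal runs of equal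
--     # bits and place each run's disks on one peg at once, instead of A's
--     # per-character state machine.
--     x = f'{m:b}'.zfill(disks)
--     n = len(x)
--     pegs = [[], [], []]
--     bit0 = 1 if x[0] == '1' else 0
--     # first run (the largest disk's run) goes on peg bit0*2
--     j = 1
--     while j < n and (1 if x[j] == '1' else 0) == bit0:
--         j += 1
--     peg = bit0 * 2
--     pegs[peg].extend(disks - k for k in range(0, j))
--     sc = j - 1
--     i = j
--     while i < n:
--         b = 1 if x[i] == '1' else 0
--         j = i + 1
--         while j < n and (1 if x[j] == '1' else 0) == b:
--             j += 1
--         peg = (peg + (-1 if (sc + bit0) % 2 == 1 else 1)) % 3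
--         pegs[peg].extend(disks - k for k in range(i, j))
--         sc += (j - i) - 1
--         i = j
--     for p in pegs:
--         p.sort()
--     return pegs
-- ===== Notes on version B (the rewrite author's own statement) =====
-- stated objective: alternative
-- what changed: Replaces A's per-character five-variable transition machine (if/elif/else over enumerate(x)) with a pass over maximal runs of equal bits: each run is located by scanning, its whole block of disks is extended onto one peg at once, and the peg transition is computed once per run.
import Mathlib
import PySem

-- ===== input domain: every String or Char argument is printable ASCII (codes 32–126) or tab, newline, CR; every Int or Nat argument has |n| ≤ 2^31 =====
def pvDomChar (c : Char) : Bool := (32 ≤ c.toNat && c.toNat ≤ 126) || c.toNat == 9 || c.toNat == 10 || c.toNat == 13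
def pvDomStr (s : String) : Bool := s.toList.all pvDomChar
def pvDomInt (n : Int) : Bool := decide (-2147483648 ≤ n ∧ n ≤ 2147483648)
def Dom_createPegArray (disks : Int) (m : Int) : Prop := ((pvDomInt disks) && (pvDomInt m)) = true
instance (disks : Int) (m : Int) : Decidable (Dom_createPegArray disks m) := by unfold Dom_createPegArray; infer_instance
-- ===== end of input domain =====

-- B replaces A's per-character five-variable transition machine by a pass over
-- maximal runs of equal bits, placing each run's disks on one peg at once
-- (objective: alternative decomposition; same asymptotic cost).

-- ===== PORT A =====
-- thisList as a triple of pegs; thisList[p].append(v) for p ∈ {0,1,2}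
def pvAppendAt (t : List Int × List Int × List Int) (p : Int) (v : Int) :
    List Int × List Int × List Int :=
  if p == 0 then (t.1 ++ [v], t.2.1, t.2.2)
  else if p == 1 then (t.1, t.2.1 ++ [v], t.2.2)
  else (t.1, t.2.1, t.2.2 ++ [v])

-- the `for i,c in enumerate(x)` loop; state = (thisList, stackCounter, bit0, previousBit, prevPost)
def pvLoopA (disks : Int) :
    List Char → Int → (List Int × List Int × List Int) × Int × Int × Int × Int →
    (List Int × List Int × List Int) × Int × Int × Int × Int
  | [], _, st => st
  | c :: rest, i, (tl, sc, bit0, prevBit, prevPost) =>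
    let currBit : Int := if c == '1' then 1 else 0
    if i == 0 then
      let bit0' := currBit
      let prevPost' := bit0' * 2
      pvLoopA disks rest (i + 1) (pvAppendAt tl prevPost' (disks - i), 0, bit0', currBit, prevPost')
    else if prevBit == currBit then
      pvLoopA disks rest (i + 1) (pvAppendAt tl prevPost (disks - i), sc + 1, bit0, prevBit, prevPost)
    else
      let calcMax := sc + bit0
      let prevPost' := PySem.Int.mod (prevPost + (if PySem.Int.mod calcMax 2 == 1 then -1 else 1)) 3
      pvLoopA disks rest (i + 1) (pvAppendAt tl prevPost' (disks - i), sc, bit0, currBit, prevPost')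

def createPegArray (disks : Int) (m : Int) : List (List Int) :=
  let x := PySem.Chars.zfill (PySem.Int.toBinChars m) disks   -- f'{m:b}'.zfill(disks)
  let st := pvLoopA disks x 0 (([], [], []), 0, 0, 0, 0)
  let tl := st.1
  [PySem.List.sorted tl.1 (fun v => v), PySem.List.sorted tl.2.1 (fun v => v),
   PySem.List.sorted tl.2.2 (fun v => v)]

-- ===== PORT B =====
def pvBit (c : Char) : Int := if c == '1' then 1 else 0

-- [disks - i, disks - (i+1), …] (k values) — the `disks - k for k in range(i, j)` generator, k = j - i
def pvSeq (disks : Int) : Int → Nat → List Int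
  | _, 0 => []
  | i, k + 1 => (disks - i) :: pvSeq disks (i + 1) k

-- pegs[p].extend(vs)
def pvExtendAt (t : List Int × List Int × List Int) (p : Int) (vs : List Int) :
    List Int × List Int × List Int :=
  vs.foldl (fun t v => pvAppendAt t p v) t

-- B's `while i < n` loop over the later runs; cs is the remaining suffix starting at index i,
-- whose first bit always differs from the previous run's bit
def pvLoopB (disks : Int) :
    List Char → Int → (List Int × List Int × List Int) → Int → Int → Int →
    List Int × List Int × List Int
  | [], _, pegs, _, _, _ => pegs
  | c :: tl, i, pegs, sc, bit0, peg =>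
    let run' := tl.takeWhile (fun d => pvBit d == pvBit c)
    let rest := tl.dropWhile (fun d => pvBit d == pvBit c)
    let len : Int := (run'.length : Int) + 1
    let peg' := PySem.Int.mod (peg + (if PySem.Int.mod (sc + bit0) 2 == 1 then -1 else 1)) 3
    let pegs' := pvExtendAt pegs peg' (pvSeq disks i (run'.length + 1))
    pvLoopB disks rest (i + len) pegs' (sc + len - 1) bit0 peg'
  termination_by cs => cs.length
  decreasing_by
    simpa using Nat.lt_succ_of_le (List.length_dropWhile_le _ tl)

def createPegArray_alt (disks : Int) (m : Int) : List (List Int) :=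
  let x := PySem.Chars.zfill (PySem.Int.toBinChars m) disks
  let t :=
    match x with
    | [] => (([], [], []) : List Int × List Int × List Int)   -- unreachable: x is never empty
    | c :: tl =>
      let bit0 := pvBit c
      let run' := tl.takeWhile (fun d => pvBit d == bit0)
      let rest := tl.dropWhile (fun d => pvBit d == bit0)
      let peg := bit0 * 2
      let pegs := pvExtendAt (([], [], []) : List Int × List Int × List Int) peg
        (pvSeq disks 0 (run'.length + 1))
      pvLoopB disks rest ((run'.length : Int) + 1) pegs (run'.length : Int) bit0 peg
  [PySem.List.sorted t.1 (fun v => v), PySem.List.sorted t.2.1 (fun v => v),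
   PySem.List.sorted t.2.2 (fun v => v)]

-- ===== PRECONDITION & SPEC =====
def Spec_createPegArray (disks : Int) (m : Int) (out : List (List Int)) : Prop := out = createPegArray_alt disks m
instance (disks : Int) (m : Int) (out : List (List Int)) : Decidable (Spec_createPegArray disks m out) := by unfold Spec_createPegArray; infer_instance

-- ===== CLAIM (what is proved, stated in full; the proofs are below) =====
def Claim_equal_createPegArray : Prop := ∀ (disks : Int) (m : Int), Dom_createPegArray disks m → Spec_createPegArray disks m (createPegArray disks m)

-- ===== LEMMAS AND PROOFS =====

-- A run of characters all with bit b, in the `elif` state (previousBit = b, i ≠ 0):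
-- A appends exactly the run's disks on prevPost and adds the run length to stackCounter.
theorem pvElifRun (disks : Int) (run : List Char) (b : Int)
    (hb : ∀ c ∈ run, pvBit c = b) :
    ∀ (rest : List Char) (i : Int) (tl : List Int × List Int × List Int)
      (sc bit0 peg : Int), 0 < i →
    pvLoopA disks (run ++ rest) i (tl, sc, bit0, b, peg)
      = pvLoopA disks rest (i + run.length)
          (pvExtendAt tl peg (pvSeq disks i run.length), sc + run.length, bit0, b, peg) := by
  induction run with
  | nil => intro rest i tl sc bit0 peg hi; simp [pvSeq, pvExtendAt]
  | cons c cs ih =>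
    intro rest i tl sc bit0 peg hi
    have hc : pvBit c = b := hb c (by simp)
    have hcs : ∀ d ∈ cs, pvBit d = b := fun d hd => hb d (by simp [hd])
    have hi0 : (i == (0 : Int)) = false := by simp; omega
    have hbe : (b == (if c == '1' then 1 else 0)) = true := by
      simp [pvBit] at hc; simp [← hc]
    simp only [List.cons_append, pvLoopA, hbe, hi0, Bool.false_eq_true, if_false, if_true]
    rw [ih hcs rest (i + 1) _ _ _ _ (by omega)]
    simp only [pvSeq, pvExtendAt, List.foldl_cons, List.length_cons]
    push_cast
    congr 1
    · ring
    · refine congrArg₂ _ rfl (congrArg₂ _ (by ring) rfl)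

theorem pvBit_eq (c : Char) : (if c == '1' then (1 : Int) else 0) = pvBit c := rfl

-- After the first run, A's remaining loop (state machine) equals B's run loop:
-- at every call the suffix cs starts (if nonempty) with a bit different from previousBit.
theorem pvLoopAB (disks : Int) : ∀ (n : Nat) (cs : List Char), cs.length ≤ n →
    ∀ (i : Int) (tl : List Int × List Int × List Int) (sc bit0 prevBit peg : Int),
    0 < i → (∀ c', cs.head? = some c' → (prevBit == pvBit c') = false) →
    (pvLoopA disks cs i (tl, sc, bit0, prevBit, peg)).1 = pvLoopB disks cs i tl sc bit0 peg := by
  intro n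
  induction n with
  | zero =>
    intro cs hcs i tl sc bit0 prevBit peg hi hhd
    have : cs = [] := List.eq_nil_of_length_eq_zero (Nat.le_zero.mp hcs)
    subst this
    simp [pvLoopA, pvLoopB]
  | succ n ih =>
    intro cs hcs i tl sc bit0 prevBit peg hi hhd
    match cs with
    | [] => simp [pvLoopA, pvLoopB]
    | c :: tl' =>
      have hi0 : (i == (0 : Int)) = false := by simp; omega
      have hpb : (prevBit == pvBit c) = false := hhd c rfl
      have hsplit : tl' = tl'.takeWhile (fun d => pvBit d == pvBit c)
          ++ tl'.dropWhile (fun d => pvBit d == pvBit c) :=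
        (List.takeWhile_append_dropWhile).symm
      have hbits : ∀ d ∈ tl'.takeWhile (fun d => pvBit d == pvBit c), pvBit d = pvBit c := by
        intro d hd
        have := List.mem_takeWhile_imp hd
        simpa [pvBit] using this
      have hlen : (tl'.dropWhile (fun d => pvBit d == pvBit c)).length ≤ n := by
        have h1 := List.length_dropWhile_le (fun d => pvBit d == pvBit c) tl'
        simp at hcs; omega
      have hhd' : ∀ c', (tl'.dropWhile (fun d => pvBit d == pvBit c)).head? = some c' →
          ((pvBit c : Int) == pvBit c') = false := by
        intro c' hc'
        have hw : tl'.dropWhile (fun d => pvBit d == pvBit c) ≠ [] := by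
          intro h; rw [h] at hc'; simp at hc'
        have hh := List.head_dropWhile_not (fun d => pvBit d == pvBit c) hw
        have he := List.head?_eq_some_head hw
        rw [hc'] at he
        have hce : (tl'.dropWhile (fun d => pvBit d == pvBit c)).head hw = c' := by
          injection he.symm
        rw [hce] at hh
        simp [pvBit] at hh ⊢
        omega
      -- A: first char takes the else branch, then the run is consumed in elif mode
      conv_lhs => rw [hsplit]
      simp only [pvLoopA, pvBit_eq, hi0, hpb, Bool.false_eq_true, if_false]
      rw [pvElifRun disks _ (pvBit c) hbits _ (i + 1) _ _ _ _ (by omega)]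
      rw [ih _ hlen (i + 1 + (tl'.takeWhile (fun d => pvBit d == pvBit c)).length)
        _ _ _ _ _ (by omega) hhd']
      -- B: one step of the run loop
      conv_rhs => rw [pvLoopB]
      simp only [pvSeq, pvExtendAt, List.foldl_cons]
      have e1 : i + 1 + ((tl'.takeWhile (fun d => pvBit d == pvBit c)).length : Int)
          = i + (((tl'.takeWhile (fun d => pvBit d == pvBit c)).length : Int) + 1) := by ring
      have e2 : sc + ((tl'.takeWhile (fun d => pvBit d == pvBit c)).length : Int)
          = sc + (((tl'.takeWhile (fun d => pvBit d == pvBit c)).length : Int) + 1) - 1 := by ring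
      rw [e1, e2]

-- ===== VERDICT (by name: the statement is the Claim_ definition above) =====
theorem createPegArray_spec : Claim_equal_createPegArray := by
  intro disks m _
  unfold Spec_createPegArray createPegArray createPegArray_alt
  match hx : PySem.Chars.zfill (PySem.Int.toBinChars m) disks with
  | [] => simp [pvLoopA]
  | c :: tl' =>
    have hsplit : tl' = tl'.takeWhile (fun d => pvBit d == pvBit c)
        ++ tl'.dropWhile (fun d => pvBit d == pvBit c) :=
      (List.takeWhile_append_dropWhile).symm
    have hbits : ∀ d ∈ tl'.takeWhile (fun d => pvBit d == pvBit c), pvBit d = pvBit c := by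
      intro d hd
      have := List.mem_takeWhile_imp hd
      simpa [pvBit] using this
    have hhd' : ∀ c', (tl'.dropWhile (fun d => pvBit d == pvBit c)).head? = some c' →
        ((pvBit c : Int) == pvBit c') = false := by
      intro c' hc'
      have hw : tl'.dropWhile (fun d => pvBit d == pvBit c) ≠ [] := by
        intro h; rw [h] at hc'; simp at hc'
      have hh := List.head_dropWhile_not (fun d => pvBit d == pvBit c) hw
      have he := List.head?_eq_some_head hw
      rw [hc'] at he
      have hce : (tl'.dropWhile (fun d => pvBit d == pvBit c)).head hw = c' := by
        injection he.symm
      rw [hce] at hh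
      simp [pvBit] at hh ⊢
      omega
    conv_lhs => rw [hsplit]
    simp only [pvLoopA, pvBit_eq, show ((0 : Int) == 0) = true from rfl, if_true]
    rw [pvElifRun disks _ (pvBit c) hbits _ (0 + 1) _ _ _ _ (by omega)]
    rw [pvLoopAB disks (tl'.dropWhile (fun d => pvBit d == pvBit c)).length _ le_rfl
      (0 + 1 + (tl'.takeWhile (fun d => pvBit d == pvBit c)).length) _ _ _ _ _ (by omega) hhd']
    simp only [pvSeq, pvExtendAt, List.foldl_cons]
    have e1 : (0 : Int) + 1 + ((tl'.takeWhile (fun d => pvBit d == pvBit c)).length : Int)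
        = ((tl'.takeWhile (fun d => pvBit d == pvBit c)).length : Int) + 1 := by ring
    have e2 : (0 : Int) + ((tl'.takeWhile (fun d => pvBit d == pvBit c)).length : Int)
        = ((tl'.takeWhile (fun d => pvBit d == pvBit c)).length : Int) := by ring
    have e3 : (0 : Int) + 1 = 1 := by ring
    rw [e1, e2, e3]
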